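-- pv_equiv track=rewrite | github.com/samsiteweb/py_learn | personal_challenge_2.py | compareTriples_zip
-- ===== SOURCE A (Python) =====
-- def compareTriples_zip(a,b):
--     bob, alice = 0, 0
--
--     for score_a, score_b in zip(a, b):
--         if score_a > score_b:
--             bob += 1
--         elif score_a < score_b:
--             alice += 1
--
--     return [bob, alice]
-- ===== SOURCE B (Python) =====
-- def compareTriples_zip(a, b):
--     signs = [(x > y) - (x < y) for x, y in zip(a, b)]
--     return [signs.count(1), signs.count(-1)]
-- ===== Notes on version B (the rewrite author's own statement) =====
-- stated objective: alternative
-- what changed: B materializes a list of per-position comparison signs and counts +1 and -1 in two separate passes, instead of A's single loop with two inline counters.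
import Mathlib
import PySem

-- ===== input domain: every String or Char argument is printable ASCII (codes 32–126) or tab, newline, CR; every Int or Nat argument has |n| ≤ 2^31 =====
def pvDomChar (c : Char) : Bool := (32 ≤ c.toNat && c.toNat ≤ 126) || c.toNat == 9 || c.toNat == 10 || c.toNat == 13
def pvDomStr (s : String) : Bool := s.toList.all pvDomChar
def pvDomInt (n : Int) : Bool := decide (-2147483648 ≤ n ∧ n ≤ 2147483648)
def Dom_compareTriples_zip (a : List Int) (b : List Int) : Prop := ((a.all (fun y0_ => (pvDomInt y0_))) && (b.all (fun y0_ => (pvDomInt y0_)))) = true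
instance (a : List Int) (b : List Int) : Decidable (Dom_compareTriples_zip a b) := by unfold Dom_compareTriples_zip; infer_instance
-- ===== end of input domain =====

-- ===== PORT A =====
-- One honest line: B builds a list of comparison signs and counts it twice (alternative decomposition, same cost).
def compareTriples_zip (a : List Int) (b : List Int) : List Int :=
  let st := (a.zip b).foldl
    (fun (s : Int × Int) (p : Int × Int) =>
      if p.1 > p.2 then (s.1 + 1, s.2)
      else if p.1 < p.2 then (s.1, s.2 + 1)
      else s) (0, 0)
  [st.1, st.2]

-- ===== PORT B =====
def compareTriples_zip_alt (a : List Int) (b : List Int) : List Int :=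
  let signs : List Int := (a.zip b).map
    (fun p => (if p.1 > p.2 then (1 : Int) else 0) - (if p.1 < p.2 then 1 else 0))
  [(signs.count 1 : Nat), (signs.count (-1) : Nat)]

-- ===== PRECONDITION & SPEC =====
def Spec_compareTriples_zip (a : List Int) (b : List Int) (out : List Int) : Prop := out = compareTriples_zip_alt a b
instance (a : List Int) (b : List Int) (out : List Int) : Decidable (Spec_compareTriples_zip a b out) := by unfold Spec_compareTriples_zip; infer_instance

-- ===== CLAIM (what is proved, stated in full; the proofs are below) =====
def Claim_equal_compareTriples_zip : Prop := ∀ (a : List Int) (b : List Int), Dom_compareTriples_zip a b → Spec_compareTriples_zip a b (compareTriples_zip a b)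

-- ===== LEMMAS AND PROOFS =====

-- ===== VERDICT (by name: the statement is the Claim_ definition above) =====
theorem fold_counts (l : List (Int × Int)) (bob alice : Int) :
    (l.foldl
      (fun (s : Int × Int) (p : Int × Int) =>
        if p.1 > p.2 then (s.1 + 1, s.2)
        else if p.1 < p.2 then (s.1, s.2 + 1)
        else s) (bob, alice)) =
    (bob + ((l.map (fun p => (if p.1 > p.2 then (1 : Int) else 0) - (if p.1 < p.2 then 1 else 0))).count 1 : Nat),
     alice + ((l.map (fun p => (if p.1 > p.2 then (1 : Int) else 0) - (if p.1 < p.2 then 1 else 0))).count (-1) : Nat)) := by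
  induction l generalizing bob alice with
  | nil => simp
  | cons h t ih =>
    rcases lt_trichotomy h.1 h.2 with hlt | heq | hgt
    · have hs : ((if h.1 > h.2 then (1 : Int) else 0) - (if h.1 < h.2 then 1 else 0)) = -1 := by
        split_ifs <;> omega
      simp only [List.foldl_cons, List.map_cons, List.count_cons, hs,
        if_neg (show ¬ h.1 > h.2 by omega), if_pos hlt, ih]
      simp
      omega
    · have hs : ((if h.1 > h.2 then (1 : Int) else 0) - (if h.1 < h.2 then 1 else 0)) = 0 := by
        split_ifs <;> omega
      simp only [List.foldl_cons, List.map_cons, List.count_cons, hs,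
        if_neg (show ¬ h.1 > h.2 by omega), if_neg (show ¬ h.1 < h.2 by omega), ih]
      simp
    · have hs : ((if h.1 > h.2 then (1 : Int) else 0) - (if h.1 < h.2 then 1 else 0)) = 1 := by
        split_ifs <;> omega
      simp only [List.foldl_cons, List.map_cons, List.count_cons, hs,
        if_pos hgt, ih]
      simp
      omega

theorem compareTriples_zip_spec : Claim_equal_compareTriples_zip := by
  intro a b _
  unfold Spec_compareTriples_zip compareTriples_zip compareTriples_zip_alt
  simp only [fold_counts]
  simp
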